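-- pv_equiv track=rewrite | github.com/pypi-data/pypi-mirror-9 | packages/state-machine-crawler/state-machine-crawler-5.0.1.tar.gz/state-machine-crawler-5.0.1/state_machine_crawler/state_machine_crawler.py | _get_missing_nodes
-- ===== SOURCE A (Python) =====
-- def _get_missing_nodes(graph, sub_graph, entry_point):
--     """ Returns a set of nodes that are present in the @graph but are missing in the @sub_graph """
--     all_nodes = set()
--
--     def _add_nodes(parent):
--         if parent in all_nodes:
--             return
--         all_nodes.add(parent)
--         for child in graph.get(parent, []):
--             _add_nodes(child)
--
--     def _remove_nodes(parent):
--         if parent not in all_nodes: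
--             return
--         all_nodes.remove(parent)
--         for child in sub_graph.get(parent, []):
--             _remove_nodes(child)
--
--     _add_nodes(entry_point)
--     _remove_nodes(entry_point)
--
--     return all_nodes
-- ===== SOURCE B (Python) =====
-- def _reachable(adj, start, allowed):
--     """Iterative DFS: nodes reachable from start via adj, traversing only allowed nodes."""
--     seen = set()
--     stack = [start]
--     while stack:
--         node = stack.pop()
--         if allowed(node) and node not in seen:
--             seen.add(node)
--             stack.extend(reversed(adj.get(node, [])))
--     return seen
--
--
-- def _get_missing_nodes(graph, sub_graph, entry_point):
--     """ Returns a set of nodes that are present in the @graph but are missing in the @sub_graph """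
--     added = _reachable(graph, entry_point, lambda n: True)
--     removed = _reachable(sub_graph, entry_point, lambda n: n in added)
--     return added - removed
-- ===== Notes on version B (the rewrite author's own statement) =====
-- stated objective: alternative
-- what changed: A's two recursive closures that mutate one shared set are replaced by a single iterative explicit-stack DFS helper used twice (reachable nodes, then removal-reachable nodes pruned to the first set) followed by a set difference, avoiding recursion entirely.
import Mathlib
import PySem

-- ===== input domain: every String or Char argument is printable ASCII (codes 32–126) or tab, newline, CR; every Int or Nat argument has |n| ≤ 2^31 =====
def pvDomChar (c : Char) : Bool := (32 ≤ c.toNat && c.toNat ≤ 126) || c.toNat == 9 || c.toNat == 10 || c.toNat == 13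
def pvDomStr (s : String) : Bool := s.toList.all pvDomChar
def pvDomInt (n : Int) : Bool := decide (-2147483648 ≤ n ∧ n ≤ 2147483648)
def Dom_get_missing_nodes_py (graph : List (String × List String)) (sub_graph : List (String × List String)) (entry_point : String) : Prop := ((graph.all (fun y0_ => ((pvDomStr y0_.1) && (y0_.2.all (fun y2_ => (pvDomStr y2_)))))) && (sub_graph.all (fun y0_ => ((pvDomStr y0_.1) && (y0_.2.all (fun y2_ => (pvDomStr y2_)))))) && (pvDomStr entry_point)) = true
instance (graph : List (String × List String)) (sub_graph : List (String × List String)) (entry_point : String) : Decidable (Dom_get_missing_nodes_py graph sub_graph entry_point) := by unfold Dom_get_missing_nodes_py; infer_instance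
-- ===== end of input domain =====

-- B replaces A's two recursive closures mutating one set by a single iterative
-- stack-based traversal helper used twice plus a set difference (objective: alternative).
-- Python A returns a set; equality of the ports is on the canonical insertion-order list.

-- ===== PORT A =====
-- graph.get(p, []) on the dict (assoc list, first match)
def pvGetD (d : List (String × List String)) (k : String) : List String :=
  PySem.Dict.getD (PySem.Dict.mk d) k []

-- _add_nodes: 'if parent in all_nodes: return; all_nodes.add(parent); for child in graph.get(parent, []): _add_nodes(child)'.
-- The fuel argument is an artifact of porting the recursion; the top-level call passes enough fuel that it never runs out.
def pvAddNodes (g : List (String × List String)) : Nat → PySem.Set String → String → PySem.Set String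
  | 0, v, _ => v
  | n + 1, v, p =>
    if PySem.Set.contains v p then v
    else (pvGetD g p).foldl (pvAddNodes g n) (PySem.Set.add v p)

-- _remove_nodes: 'if parent not in all_nodes: return; all_nodes.remove(parent); for child in sub_graph.get(parent, []): _remove_nodes(child)'
-- (remove on a present element = discard).
def pvRemoveNodes (sg : List (String × List String)) : Nat → PySem.Set String → String → PySem.Set String
  | 0, v, _ => v
  | n + 1, v, p =>
    if PySem.Set.contains v p then
      (pvGetD sg p).foldl (pvRemoveNodes sg n) (PySem.Set.discard v p)
    else v

def get_missing_nodes_py (graph : List (String × List String)) (sub_graph : List (String × List String)) (entry_point : String) : List String :=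
  let U := entry_point :: graph.flatMap (fun kv => kv.2)
  let all_nodes := pvAddNodes graph (U.length + 1) PySem.Set.empty entry_point
  pvRemoveNodes sub_graph (all_nodes.length + 1) all_nodes entry_point

-- ===== PORT B =====
-- _reachable: iterative DFS with an explicit stack (Python pops from the end and pushes
-- reversed children; modelled head-as-top, so extend(reversed(cs)) is 'cs ++ stack').
-- The fuel argument is an artifact of porting the while loop; pvFuel bounds the iterations.
def pvTraverse (adj : List (String × List String)) (allowed : String → Bool) : Nat → PySem.Set String → List String → PySem.Set String
  | 0, seen, _ => seen
  | _ + 1, seen, [] => seen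
  | n + 1, seen, node :: stack =>
    if allowed node && !(PySem.Set.contains seen node) then
      pvTraverse adj allowed n (PySem.Set.add seen node) (pvGetD adj node ++ stack)
    else pvTraverse adj allowed n seen stack

def pvFuel (adj : List (String × List String)) (src : List String) : Nat :=
  (src.map (fun x => (pvGetD adj x).length + 1)).sum + 2

def get_missing_nodes_py_alt (graph : List (String × List String)) (sub_graph : List (String × List String)) (entry_point : String) : List String :=
  let added := pvTraverse graph (fun _ => true) (pvFuel graph (entry_point :: graph.flatMap (fun kv => kv.2))) PySem.Set.empty [entry_point]
  let removed := pvTraverse sub_graph (fun n => PySem.Set.contains added n) (pvFuel sub_graph added) PySem.Set.empty [entry_point]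
  PySem.Set.diff added removed

-- ===== PRECONDITION & SPEC =====
def Spec_get_missing_nodes_py (graph : List (String × List String)) (sub_graph : List (String × List String)) (entry_point : String) (out : List String) : Prop := out = get_missing_nodes_py_alt graph sub_graph entry_point
instance (graph : List (String × List String)) (sub_graph : List (String × List String)) (entry_point : String) (out : List String) : Decidable (Spec_get_missing_nodes_py graph sub_graph entry_point out) := by unfold Spec_get_missing_nodes_py; infer_instance

-- ===== CLAIM (what is proved, stated in full; the proofs are below) =====
def Claim_equal_get_missing_nodes_py : Prop := ∀ (graph : List (String × List String)) (sub_graph : List (String × List String)) (entry_point : String), Dom_get_missing_nodes_py graph sub_graph entry_point → Spec_get_missing_nodes_py graph sub_graph entry_point (get_missing_nodes_py graph sub_graph entry_point)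

-- ===== LEMMAS AND PROOFS =====

theorem pv_contains_iff {v : List String} {x : String} :
    PySem.Set.contains v x = true ↔ x ∈ v := by
  simp [PySem.Set.contains]

theorem pv_contains_add (v : PySem.Set String) (p x : String) :
    PySem.Set.contains (PySem.Set.add v p) x = (PySem.Set.contains v x || x == p) := by
  cases hx : (x == p)
  · have hxp : x ≠ p := by simpa using hx
    simp only [PySem.Set.add]
    split
    · simp
    · simp [List.mem_append, hxp]
  · have hxp : x = p := by simpa using hx
    subst hxp
    simp [PySem.Set.mem_add]

theorem pv_sublist_sum_le (l₁ l₂ : List Nat) (h : l₁.Sublist l₂) : l₁.sum ≤ l₂.sum := by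
  induction h with
  | slnil => exact le_refl _
  | cons a _ ih => simpa using le_trans ih (Nat.le_add_left _ _)
  | cons₂ a _ ih => simpa using ih

def pvPot (f : String → Nat) (U : List String) (v : PySem.Set String) : Nat :=
  ((U.filter (fun x => !(PySem.Set.contains v x))).map f).sum

theorem pvPot_mono (f : String → Nat) (U : List String) (v w : PySem.Set String)
    (h : ∀ x, PySem.Set.contains v x = true → PySem.Set.contains w x = true) :
    pvPot f U w ≤ pvPot f U v := by
  refine pv_sublist_sum_le _ _ (List.Sublist.map f ?_)
  refine List.monotone_filter_right U ?_
  intro a ha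
  cases hv : PySem.Set.contains v a
  · simp
  · exact absurd (pv_contains_iff.mp (h a hv)) (by simpa using ha)

theorem pvPot_add_lt (f : String → Nat) (U : List String) (v : PySem.Set String) (p : String)
    (hp : p ∈ U) (hv : PySem.Set.contains v p = false) :
    pvPot f U (PySem.Set.add v p) + f p ≤ pvPot f U v := by
  induction U with
  | nil => simp at hp
  | cons a U ih =>
    simp only [pvPot, List.filter_cons] at *
    by_cases hap : a = p
    · subst hap
      simp only [pv_contains_add, hv, beq_self_eq_true, Bool.or_true, Bool.not_true,
        Bool.not_false, if_true]
      simp only [Bool.false_eq_true, if_false, List.map_cons, List.sum_cons]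
      have := pvPot_mono f U v (PySem.Set.add v a)
        (by intro x hx; rw [pv_contains_add, hx]; simp)
      simp only [pvPot, pv_contains_add] at this
      omega
    · have hpU : p ∈ U := by
        rcases List.mem_cons.mp hp with h | h
        · exact absurd h.symm hap
        · exact h
      have hca : PySem.Set.contains (PySem.Set.add v p) a = PySem.Set.contains v a := by
        rw [pv_contains_add]
        have : (a == p) = false := by simp [hap]
        simp [this]
      rw [hca]
      cases hva : PySem.Set.contains v a
      · simp only [Bool.not_false, if_true, List.map_cons, List.sum_cons]
        have := ih hpU
        omega
      · simp only [Bool.not_true, Bool.false_eq_true, if_false]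
        exact ih hpU

theorem pvPot_one_eq_length (U : List String) (v : PySem.Set String) :
    pvPot (fun _ => 1) U v = (U.filter (fun x => !(PySem.Set.contains v x))).length := by
  simp [pvPot]

-- membership is preserved by pvAddNodes (proved with a generic foldl-preservation helper)
theorem pv_foldl_pres {α : Type} (f : PySem.Set String → α → PySem.Set String)
    (hf : ∀ v p x, PySem.Set.contains v x = true → PySem.Set.contains (f v p) x = true)
    (cs : List α) (v : PySem.Set String) (x : String)
    (h : PySem.Set.contains v x = true) :
    PySem.Set.contains (cs.foldl f v) x = true := by
  induction cs generalizing v with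
  | nil => simpa using h
  | cons c cs ih => exact ih _ (hf _ _ _ h)

theorem pvAdd_mono (g : List (String × List String)) :
    ∀ (n : Nat) (v : PySem.Set String) (p x : String),
      PySem.Set.contains v x = true → PySem.Set.contains (pvAddNodes g n v p) x = true := by
  intro n
  induction n with
  | zero => intro v p x h; simpa [pvAddNodes] using h
  | succ n ih =>
    intro v p x h
    simp only [pvAddNodes]
    split
    · exact h
    · refine pv_foldl_pres _ (fun v p x h => ih v p x h) _ _ _ ?_
      rw [pv_contains_add, h]; simp

-- with enough fuel (measured by the remaining potential) pvAddNodes is fuel-independent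
theorem pvAdd_irrel (g : List (String × List String)) (U : List String)
    (hU : ∀ p c, c ∈ pvGetD g p → c ∈ U) :
    ∀ (n m : Nat) (v : PySem.Set String) (p : String), p ∈ U →
      pvPot (fun _ => 1) U v + 1 ≤ n → pvPot (fun _ => 1) U v + 1 ≤ m →
      pvAddNodes g n v p = pvAddNodes g m v p := by
  intro n
  induction n using Nat.strong_induction_on with
  | _ n IH =>
  intro m v p hp hn hm
  obtain ⟨n₀, rfl⟩ : ∃ k, n = k + 1 := ⟨n - 1, by omega⟩
  obtain ⟨m₀, rfl⟩ : ∃ k, m = k + 1 := ⟨m - 1, by omega⟩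
  simp only [pvAddNodes]
  split
  · rfl
  · rename_i hvp
    have hvp' : PySem.Set.contains v p = false := by
      cases h : PySem.Set.contains v p
      · rfl
      · exact absurd h hvp
    have hlt : pvPot (fun _ => 1) U (PySem.Set.add v p) + 1 ≤ pvPot (fun _ => 1) U v := by
      simpa using pvPot_add_lt (fun _ => 1) U v p hp hvp'
    have aux : ∀ (cs : List String) (w : PySem.Set String), (∀ c ∈ cs, c ∈ U) →
        pvPot (fun _ => 1) U w + 1 ≤ n₀ → pvPot (fun _ => 1) U w + 1 ≤ m₀ →
        cs.foldl (pvAddNodes g n₀) w = cs.foldl (pvAddNodes g m₀) w := by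
      intro cs
      induction cs with
      | nil => intro w _ _ _; rfl
      | cons c cs ihc =>
        intro w hcs h1 h2
        simp only [List.foldl_cons]
        rw [← IH n₀ (by omega) m₀ w c (hcs c (by simp)) h1 h2]
        have hmono : pvPot (fun _ => 1) U (pvAddNodes g n₀ w c) ≤ pvPot (fun _ => 1) U w :=
          pvPot_mono _ _ _ _ (fun x hx => pvAdd_mono g n₀ w c x hx)
        exact ihc _ (fun c hc => hcs c (by simp [hc])) (by omega) (by omega)
    exact aux _ _ (fun c hc => hU p c hc) (by omega) (by omega)

theorem pvAddList_irrel (g : List (String × List String)) (U : List String)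
    (hU : ∀ p c, c ∈ pvGetD g p → c ∈ U) (n m : Nat) :
    ∀ (cs : List String) (w : PySem.Set String), (∀ c ∈ cs, c ∈ U) →
      pvPot (fun _ => 1) U w + 1 ≤ n → pvPot (fun _ => 1) U w + 1 ≤ m →
      cs.foldl (pvAddNodes g n) w = cs.foldl (pvAddNodes g m) w := by
  intro cs
  induction cs with
  | nil => intro w _ _ _; rfl
  | cons c cs ihc =>
    intro w hcs h1 h2
    simp only [List.foldl_cons]
    rw [← pvAdd_irrel g U hU n m w c (hcs c (by simp)) h1 h2]
    have hmono : pvPot (fun _ => 1) U (pvAddNodes g n w c) ≤ pvPot (fun _ => 1) U w :=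
      pvPot_mono _ _ _ _ (fun x hx => pvAdd_mono g n w c x hx)
    exact ihc _ (fun c hc => hcs c (by simp [hc])) (by omega) (by omega)

theorem pvFoldAdd_mono (g : List (String × List String)) (n : Nat)
    (cs : List String) (w : PySem.Set String) (x : String)
    (h : PySem.Set.contains w x = true) :
    PySem.Set.contains (cs.foldl (pvAddNodes g n) w) x = true :=
  pv_foldl_pres _ (fun v p x h => pvAdd_mono g n v p x h) cs w x h

-- the iterative DFS of B (phase 1) computes A's recursive DFS fold
theorem pvLoop_eq_fold (g : List (String × List String)) (U : List String)
    (hU : ∀ p c, c ∈ pvGetD g p → c ∈ U) :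
    ∀ (m n : Nat) (v : PySem.Set String) (st : List String), (∀ x ∈ st, x ∈ U) →
      pvPot (fun _ => 1) U v + 1 ≤ n →
      st.length + pvPot (fun x => (pvGetD g x).length + 1) U v + 1 ≤ m →
      pvTraverse g (fun _ => true) m v st = st.foldl (pvAddNodes g n) v := by
  intro m
  induction m using Nat.strong_induction_on with
  | _ m IH =>
  intro n v st hst hn hm
  obtain ⟨m₀, rfl⟩ : ∃ k, m = k + 1 := ⟨m - 1, by omega⟩
  obtain ⟨n₀, rfl⟩ : ∃ k, n = k + 1 := ⟨n - 1, by omega⟩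
  cases st with
  | nil => rfl
  | cons p rest =>
    simp only [List.length_cons] at hm
    simp only [pvTraverse, Bool.true_and, List.foldl_cons]
    cases hvp : PySem.Set.contains v p
    · simp only [Bool.not_false, if_true]
      have hpU : p ∈ U := hst p (by simp)
      have hpot1 : pvPot (fun _ => 1) U (PySem.Set.add v p) + 1 ≤ pvPot (fun _ => 1) U v := by
        simpa using pvPot_add_lt (fun _ => 1) U v p hpU hvp
      have hpotF : pvPot (fun x => (pvGetD g x).length + 1) U (PySem.Set.add v p)
          + ((pvGetD g p).length + 1) ≤ pvPot (fun x => (pvGetD g x).length + 1) U v :=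
        pvPot_add_lt _ U v p hpU hvp
      have hsub : ∀ x ∈ pvGetD g p ++ rest, x ∈ U := by
        intro x hx
        rcases List.mem_append.mp hx with hx | hx
        · exact hU p x hx
        · exact hst x (by simp [hx])
      have hIH := IH m₀ (by omega) n₀ (PySem.Set.add v p) (pvGetD g p ++ rest) hsub
        (by omega) (by simp only [List.length_append]; omega)
      rw [hIH, List.foldl_append]
      -- A's head step
      have hA : pvAddNodes g (n₀ + 1) v p
          = (pvGetD g p).foldl (pvAddNodes g n₀) (PySem.Set.add v p) := by
        simp only [pvAddNodes]; rw [hvp]; simp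
      rw [hA]
      -- align the fuel of the tail fold
      have hX : pvPot (fun _ => 1) U ((pvGetD g p).foldl (pvAddNodes g n₀) (PySem.Set.add v p))
          ≤ pvPot (fun _ => 1) U (PySem.Set.add v p) :=
        pvPot_mono _ _ _ _ (fun x hx => pvFoldAdd_mono g n₀ _ _ x hx)
      exact pvAddList_irrel g U hU n₀ (n₀ + 1) rest _
        (fun c hc => hst c (by simp [hc])) (by omega) (by omega)
    · simp only [Bool.not_true, Bool.false_eq_true, if_false]
      have hA : pvAddNodes g (n₀ + 1) v p = v := by
        simp only [pvAddNodes]; rw [hvp]; simp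
      rw [hA]
      exact IH m₀ (by omega) (n₀ + 1) v rest (fun x hx => hst x (by simp [hx])) hn (by omega)

theorem pv_contains_diff (a r : PySem.Set String) (x : String) :
    PySem.Set.contains (PySem.Set.diff a r) x
      = (PySem.Set.contains a x && !(PySem.Set.contains r x)) := by
  simp [PySem.Set.diff, List.mem_filter, Bool.decide_and]

theorem pv_discard_diff (a r : PySem.Set String) (p : String) :
    PySem.Set.discard (PySem.Set.diff a r) p = PySem.Set.diff a (PySem.Set.add r p) := by
  simp only [PySem.Set.discard, PySem.Set.diff, List.filter_filter]
  refine List.filter_congr ?_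
  intro x _
  rw [pv_contains_add]
  cases PySem.Set.contains r x <;> cases hx : (x == p) <;> simp

theorem pvDiff_length (a r : PySem.Set String) :
    (PySem.Set.diff a r).length = pvPot (fun _ => 1) a r := by
  rw [pvPot_one_eq_length]
  rfl

theorem pv_foldl_le {α : Type} (f : PySem.Set String → α → PySem.Set String)
    (hf : ∀ v p, (f v p).length ≤ v.length) (cs : List α) :
    ∀ (v : PySem.Set String), (cs.foldl f v).length ≤ v.length := by
  induction cs with
  | nil => intro v; simp
  | cons c cs ih => intro v; exact le_trans (ih _) (hf _ _)

theorem pv_discard_le (v : PySem.Set String) (p : String) :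
    (PySem.Set.discard v p).length ≤ v.length :=
  List.length_filter_le _ _

theorem pvRem_le (sg : List (String × List String)) :
    ∀ (n : Nat) (v : PySem.Set String) (p : String),
      (pvRemoveNodes sg n v p).length ≤ v.length := by
  intro n
  induction n with
  | zero => intro v p; simp [pvRemoveNodes]
  | succ n ih =>
    intro v p
    simp only [pvRemoveNodes]
    split
    · exact le_trans (pv_foldl_le _ (fun v p => ih v p) _ _) (pv_discard_le v p)
    · exact le_refl _

theorem pv_discard_lt (v : PySem.Set String) (p : String)
    (h : PySem.Set.contains v p = true) :
    (PySem.Set.discard v p).length < v.length := by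
  refine List.length_filter_lt_length_iff_exists.mpr ?_
  exact ⟨p, pv_contains_iff.mp h, by simp⟩

theorem pvRem_irrel (sg : List (String × List String)) :
    ∀ (n m : Nat) (v : PySem.Set String) (p : String),
      v.length + 1 ≤ n → v.length + 1 ≤ m →
      pvRemoveNodes sg n v p = pvRemoveNodes sg m v p := by
  intro n
  induction n using Nat.strong_induction_on with
  | _ n IH =>
  intro m v p hn hm
  obtain ⟨n₀, rfl⟩ : ∃ k, n = k + 1 := ⟨n - 1, by omega⟩
  obtain ⟨m₀, rfl⟩ : ∃ k, m = k + 1 := ⟨m - 1, by omega⟩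
  simp only [pvRemoveNodes]
  split
  · rename_i hvp
    have hlt := pv_discard_lt v p (by simpa using hvp)
    have aux : ∀ (cs : List String) (w : PySem.Set String),
        w.length + 1 ≤ n₀ → w.length + 1 ≤ m₀ →
        cs.foldl (pvRemoveNodes sg n₀) w = cs.foldl (pvRemoveNodes sg m₀) w := by
      intro cs
      induction cs with
      | nil => intro w _ _; rfl
      | cons c cs ihc =>
        intro w h1 h2
        simp only [List.foldl_cons]
        rw [← IH n₀ (by omega) m₀ w c h1 h2]
        have := pvRem_le sg n₀ w c
        exact ihc _ (by omega) (by omega)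
    exact aux _ _ (by omega) (by omega)
  · rfl

theorem pvRemList_irrel (sg : List (String × List String)) (n m : Nat) :
    ∀ (cs : List String) (w : PySem.Set String), w.length + 1 ≤ n → w.length + 1 ≤ m →
      cs.foldl (pvRemoveNodes sg n) w = cs.foldl (pvRemoveNodes sg m) w := by
  intro cs
  induction cs with
  | nil => intro w _ _; rfl
  | cons c cs ihc =>
    intro w h1 h2
    simp only [List.foldl_cons]
    rw [← pvRem_irrel sg n m w c h1 h2]
    have := pvRem_le sg n w c
    exact ihc _ (by omega) (by omega)

-- the iterative DFS of B (phase 2, pruned by membership in `a`) computes A's recursive removal fold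
theorem pvLoop2_eq_fold (sg : List (String × List String)) (a : PySem.Set String) :
    ∀ (m n : Nat) (r : PySem.Set String) (st : List String),
      pvPot (fun _ => 1) a r + 1 ≤ n →
      st.length + pvPot (fun x => (pvGetD sg x).length + 1) a r + 1 ≤ m →
      st.foldl (pvRemoveNodes sg n) (PySem.Set.diff a r)
        = PySem.Set.diff a (pvTraverse sg (fun x => PySem.Set.contains a x) m r st) := by
  intro m
  induction m using Nat.strong_induction_on with
  | _ m IH =>
  intro n r st hn hm
  obtain ⟨m₀, rfl⟩ : ∃ k, m = k + 1 := ⟨m - 1, by omega⟩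
  obtain ⟨n₀, rfl⟩ : ∃ k, n = k + 1 := ⟨n - 1, by omega⟩
  cases st with
  | nil => rfl
  | cons p rest =>
    simp only [List.length_cons] at hm
    simp only [pvTraverse, List.foldl_cons]
    cases hg : (PySem.Set.contains a p && !(PySem.Set.contains r p))
    · simp only [Bool.false_eq_true, if_false]
      have hd : PySem.Set.contains (PySem.Set.diff a r) p = false := by
        rw [pv_contains_diff]; exact hg
      have hA : pvRemoveNodes sg (n₀ + 1) (PySem.Set.diff a r) p = PySem.Set.diff a r := by
        simp only [pvRemoveNodes]; rw [hd]; simp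
      rw [hA]
      exact IH m₀ (by omega) (n₀ + 1) r rest hn (by omega)
    · simp only [if_true]
      have hap : PySem.Set.contains a p = true := by
        cases h : PySem.Set.contains a p
        · rw [h] at hg; simp at hg
        · rfl
      have hrp : PySem.Set.contains r p = false := by
        cases h : PySem.Set.contains r p
        · rfl
        · rw [hap, h] at hg; simp at hg
      have hd : PySem.Set.contains (PySem.Set.diff a r) p = true := by
        rw [pv_contains_diff, hap, hrp]; rfl
      have hA : pvRemoveNodes sg (n₀ + 1) (PySem.Set.diff a r) p
          = (pvGetD sg p).foldl (pvRemoveNodes sg n₀) (PySem.Set.diff a (PySem.Set.add r p)) := by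
        simp only [pvRemoveNodes]; rw [hd, pv_discard_diff]; simp
      rw [hA]
      have hpa : p ∈ a := pv_contains_iff.mp hap
      have hpot1 : pvPot (fun _ => 1) a (PySem.Set.add r p) + 1 ≤ pvPot (fun _ => 1) a r := by
        simpa using pvPot_add_lt (fun _ => 1) a r p hpa hrp
      have hpotF : pvPot (fun x => (pvGetD sg x).length + 1) a (PySem.Set.add r p)
          + ((pvGetD sg p).length + 1) ≤ pvPot (fun x => (pvGetD sg x).length + 1) a r :=
        pvPot_add_lt _ a r p hpa hrp
      -- align outer fuel n₀+1 → n₀, then merge the two folds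
      have hXle : ((pvGetD sg p).foldl (pvRemoveNodes sg n₀)
            (PySem.Set.diff a (PySem.Set.add r p))).length
          ≤ (PySem.Set.diff a (PySem.Set.add r p)).length :=
        pv_foldl_le _ (fun v q => pvRem_le sg n₀ v q) _ _
      have hlen : (PySem.Set.diff a (PySem.Set.add r p)).length
          = pvPot (fun _ => 1) a (PySem.Set.add r p) := pvDiff_length _ _
      have h1 : ((pvGetD sg p).foldl (pvRemoveNodes sg n₀) (PySem.Set.diff a (PySem.Set.add r p))).length + 1 ≤ n₀ + 1 := by omega
      have h2 : ((pvGetD sg p).foldl (pvRemoveNodes sg n₀) (PySem.Set.diff a (PySem.Set.add r p))).length + 1 ≤ n₀ := by omega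
      rw [pvRemList_irrel sg (n₀ + 1) n₀ rest _ h1 h2]
      rw [← List.foldl_append]
      exact IH m₀ (by omega) n₀ (PySem.Set.add r p) (pvGetD sg p ++ rest) (by omega)
        (by simp only [List.length_append]; omega)

theorem pvPot_empty (f : String → Nat) (U : List String) :
    pvPot f U PySem.Set.empty = (U.map f).sum := by
  simp [pvPot, PySem.Set.empty, PySem.Set.contains]

theorem pv_diff_empty (a : PySem.Set String) : PySem.Set.diff a ([] : List String) = a := by
  simp [PySem.Set.diff, PySem.Set.contains]

theorem pv_hU (g : List (String × List String)) (e : String) :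
    ∀ p c, c ∈ pvGetD g p → c ∈ e :: g.flatMap (fun kv => kv.2) := by
  intro p c hc
  simp only [pvGetD, PySem.Dict.getD, PySem.Dict.get?] at hc
  cases hfind : List.find? (fun q => q.1 == p) g with
  | none => rw [hfind] at hc; simp at hc
  | some kv =>
    rw [hfind] at hc
    simp only [Option.map_some, Option.getD_some] at hc
    have hmem : kv ∈ g := List.mem_of_find?_eq_some hfind
    exact List.mem_cons_of_mem _ (List.mem_flatMap.mpr ⟨kv, hmem, hc⟩)

theorem pv_main (graph sub_graph : List (String × List String)) (entry_point : String) :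
    get_missing_nodes_py graph sub_graph entry_point
      = get_missing_nodes_py_alt graph sub_graph entry_point := by
  have hU := pv_hU graph entry_point
  have hsum1 : pvPot (fun _ => 1) (entry_point :: graph.flatMap (fun kv => kv.2)) PySem.Set.empty
      = (entry_point :: graph.flatMap (fun kv => kv.2)).length := by
    rw [pvPot_empty]; simp; omega
  have hadded : pvTraverse graph (fun _ => true)
        (pvFuel graph (entry_point :: graph.flatMap (fun kv => kv.2)))
        PySem.Set.empty [entry_point]
      = pvAddNodes graph ((entry_point :: graph.flatMap (fun kv => kv.2)).length + 1)
        PySem.Set.empty entry_point := by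
    have := pvLoop_eq_fold graph (entry_point :: graph.flatMap (fun kv => kv.2)) hU
      (pvFuel graph (entry_point :: graph.flatMap (fun kv => kv.2)))
      ((entry_point :: graph.flatMap (fun kv => kv.2)).length + 1)
      PySem.Set.empty [entry_point]
      (by intro x hx; simp at hx; simp [hx])
      (by rw [hsum1])
      (by rw [pvPot_empty]; simp only [pvFuel, List.length_cons, List.length_nil]; omega)
    simpa using this
  set v₁ := pvAddNodes graph ((entry_point :: graph.flatMap (fun kv => kv.2)).length + 1)
    PySem.Set.empty entry_point with hv₁
  have hremoved : pvRemoveNodes sub_graph (v₁.length + 1) v₁ entry_point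
      = PySem.Set.diff v₁ (pvTraverse sub_graph (fun x => PySem.Set.contains v₁ x)
          (pvFuel sub_graph v₁) PySem.Set.empty [entry_point]) := by
    have := pvLoop2_eq_fold sub_graph v₁ (pvFuel sub_graph v₁) (v₁.length + 1)
      PySem.Set.empty [entry_point]
      (by rw [pvPot_empty]; simp)
      (by rw [pvPot_empty]; simp only [pvFuel, List.length_cons, List.length_nil]; omega)
    simpa [pv_diff_empty] using this
  show pvRemoveNodes sub_graph (v₁.length + 1) v₁ entry_point
      = (fun added => PySem.Set.diff added
          (pvTraverse sub_graph (fun n => PySem.Set.contains added n)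
            (pvFuel sub_graph added) PySem.Set.empty [entry_point]))
        (pvTraverse graph (fun _ => true)
          (pvFuel graph (entry_point :: graph.flatMap (fun kv => kv.2)))
          PySem.Set.empty [entry_point])
  rw [hadded]
  exact hremoved

-- ===== VERDICT (by name: the statement is the Claim_ definition above) =====
theorem get_missing_nodes_py_spec : Claim_equal_get_missing_nodes_py := by
  intro graph sub_graph entry_point _
  unfold Spec_get_missing_nodes_py
  exact pv_main graph sub_graph entry_point
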